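-- pv_equiv track=rewrite | github.com/jautung/advent | advent2015/5.py | is_nice_2
-- ===== SOURCE A (Python) =====
-- from collections import defaultdict
--
-- def is_nice_2(s):
--     pairs = [s[i:i+2] for i in range(len(s)-1)]
--     pairs_dict = defaultdict(lambda: [])
--     [pairs_dict[pair].append(i) for i, pair in enumerate(pairs)]
--     good_pair = False
--     for pair, poses in pairs_dict.items():
--         if max(poses) - min(poses) > 1:
--             good_pair = True
--             break
--     if not good_pair:
--         return False
--     if sum([len(set([s[i],s[i+2]])) == 1 for i in range(len(s)-2)]) < 1:
--         return False
--     return True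
-- ===== SOURCE B (Python) =====
-- def is_nice_2(s):
--     pair_ok = any(s[i:i+2] in s[i+2:] for i in range(len(s)-1))
--     mid_ok = any(s[i] == s[i+2] for i in range(len(s)-2))
--     return pair_ok and mid_ok
-- ===== Notes on version B (the rewrite author's own statement) =====
-- stated objective: idiomatic
-- what changed: Replaces A's position-index dict (grouping pair positions, then scanning max-min per key) with two direct any() scans: a substring search of each pair in the suffix s[i+2:] for the non-overlapping pair rule, and a positional comparison s[i]==s[i+2] for the sandwich rule; any() short-circuits and no dict is built.
import Mathlib
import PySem

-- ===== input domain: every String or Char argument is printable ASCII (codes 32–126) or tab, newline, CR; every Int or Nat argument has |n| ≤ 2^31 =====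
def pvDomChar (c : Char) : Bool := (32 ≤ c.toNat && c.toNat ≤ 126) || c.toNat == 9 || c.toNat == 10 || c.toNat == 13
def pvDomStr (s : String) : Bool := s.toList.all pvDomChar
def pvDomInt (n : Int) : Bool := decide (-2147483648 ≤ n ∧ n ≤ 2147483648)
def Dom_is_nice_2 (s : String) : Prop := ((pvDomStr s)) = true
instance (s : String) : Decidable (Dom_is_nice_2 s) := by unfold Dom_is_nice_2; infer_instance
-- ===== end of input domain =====

-- B drops A's pair→positions dict and instead searches each pair in the suffix s[i+2:]
-- and compares s[i] with s[i+2] directly (idiomatic rewrite; same return value).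

-- ===== PORT A =====
-- A's 'for pair, poses in pairs_dict.items(): if max-min>1: break' loop; the poses lists
-- are never empty, so the fallthrough branch (Python max([]) would raise) is unreachable.
def goodPairLoop (items : List (String × List Int)) : Bool :=
  match items with
  | [] => false
  | (_, poses) :: rest =>
    match PySem.List.max? poses (fun x => x), PySem.List.min? poses (fun x => x) with
    | some M, some m => if M - m > 1 then true else goodPairLoop rest
    | _, _ => goodPairLoop rest

def is_nice_2 (s : String) : Bool :=
  let n : Int := PySem.Str.len s
  let pairs : List String :=
    (PySem.List.pyRange 0 (n - 1) 1).map (fun i => PySem.Str.slice s (some i) (some (i + 2)))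
  let pairsDict : PySem.Dict String (List Int) :=
    (PySem.List.enumerate pairs).foldl
      (fun d p => d.modify p.2 [] (fun lst => lst ++ [p.1])) PySem.Dict.empty
  let goodPair := goodPairLoop pairsDict.items
  if !goodPair then false
  else if ((PySem.List.pyRange 0 (n - 2) 1).map (fun i =>
      if PySem.Set.len (PySem.Set.ofList [PySem.Str.pyGet? s i, PySem.Str.pyGet? s (i + 2)]) == 1
      then (1 : Int) else 0)).sum < 1 then false
  else true

-- ===== PORT B =====
def is_nice_2_alt (s : String) : Bool :=
  let n : Int := PySem.Str.len s
  let pair_ok := (PySem.List.pyRange 0 (n - 1) 1).any (fun i =>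
    PySem.Str.isIn (PySem.Str.slice s (some i) (some (i + 2))) (PySem.Str.slice s (some (i + 2)) none))
  let mid_ok := (PySem.List.pyRange 0 (n - 2) 1).any (fun i =>
    PySem.Str.pyGet? s i == PySem.Str.pyGet? s (i + 2))
  pair_ok && mid_ok

-- ===== PRECONDITION & SPEC =====
def Spec_is_nice_2 (s : String) (out : Bool) : Prop := out = is_nice_2_alt s
instance (s : String) (out : Bool) : Decidable (Spec_is_nice_2 s out) := by unfold Spec_is_nice_2; infer_instance

-- ===== CLAIM (what is proved, stated in full; the proofs are below) =====
def Claim_equal_is_nice_2 : Prop := ∀ (s : String), Dom_is_nice_2 s → Spec_is_nice_2 s (is_nice_2 s)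

-- ===== LEMMAS AND PROOFS =====

-- the common characterisation of the 'repeated non-overlapping pair' rule
def GP (l : List Char) : Prop :=
  ∃ a b : Nat, a + 2 ≤ b ∧ b + 1 < l.length ∧ (l.drop a).take 2 = (l.drop b).take 2

-- the pair substring at a Nat index
theorem slice_pair_toList (s : String) (k : Nat) :
    (PySem.Str.slice s (some (k : Int)) (some ((k : Int) + 2))).toList = (s.toList.drop k).take 2 := by
  have h2 : ((k : Int) + 2) = ((k + 2 : Nat) : Int) := by push_cast; ring
  simp only [PySem.Str.toList_slice, PySem.Chars.slice_eq_listSlice, h2,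
    PySem.List.slice_natCast]
  congr 1
  omega

theorem slice_suffix_toList (s : String) (k : Nat) :
    (PySem.Str.slice s (some ((k : Int) + 2)) none).toList = s.toList.drop (k + 2) := by
  have h2 : ((k : Int) + 2) = ((k + 2 : Nat) : Int) := by push_cast; ring
  simp only [PySem.Str.toList_slice, PySem.Chars.slice_eq_listSlice, h2,
    PySem.List.slice_from _ (Int.natCast_nonneg _), Int.toNat_natCast]

-- A's pairs list, named for the proofs
def pairsOf (s : String) : List String :=
  (PySem.List.pyRange 0 ((PySem.Str.len s) - 1) 1).map
    (fun i => PySem.Str.slice s (some i) (some (i + 2)))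

theorem pairsOf_eq (s : String) :
    pairsOf s = (List.range (s.toList.length - 1)).map
      (fun (k : Nat) => PySem.Str.slice s (some ((k : Nat) : Int)) (some (((k : Nat) : Int) + 2))) := by
  unfold pairsOf
  rw [PySem.Str.len_eq, PySem.List.pyRange_one, List.map_map]
  rw [show ((s.toList.length : Int) - 1 - 0).toNat = s.toList.length - 1 by omega]
  apply List.map_congr_left
  intro k _
  simp

theorem length_pairsOf (s : String) : (pairsOf s).length = s.toList.length - 1 := by
  rw [pairsOf_eq]; simp

theorem getElem_pairsOf_toList (s : String) (k : Nat) (hk : k < (pairsOf s).length) :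
    ((pairsOf s)[k]'hk).toList = (s.toList.drop k).take 2 := by
  have hk' : k < s.toList.length - 1 := by
    have := length_pairsOf s; omega
  have h1 : (pairsOf s)[k]? = some (PySem.Str.slice s (some (k : Int)) (some ((k : Int) + 2))) := by
    rw [pairsOf_eq]
    rw [List.getElem?_map, List.getElem?_range hk']
    rfl
  rw [List.getElem?_eq_getElem hk] at h1
  rw [Option.some.inj h1]
  exact slice_pair_toList s k

theorem take_two_len (l : List Char) (k : Nat) (hk : k + 1 < l.length) :
    ((l.drop k).take 2).length = 2 := by
  simp; omega

-- pair equality in pairsOf ↔ pair-substring equality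
theorem pairsOf_eq_iff (s : String) (a b : Nat) (ha : a < (pairsOf s).length)
    (hb : b < (pairsOf s).length) :
    (pairsOf s)[a] = (pairsOf s)[b] ↔
      (s.toList.drop a).take 2 = (s.toList.drop b).take 2 := by
  rw [← String.toList_inj, getElem_pairsOf_toList s a ha, getElem_pairsOf_toList s b hb]

-- the positions list the dict stores for key p
def posnsOf (s : String) (p : String) : List Int :=
  ((PySem.List.enumerate (pairsOf s)).filter (fun q => q.2 == p)).map (fun q => q.1)

theorem mem_posnsOf (s : String) (p : String) (i : Int) :
    i ∈ posnsOf s p ↔ ∃ k : Nat, ∃ h : k < (pairsOf s).length,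
      i = (k : Int) ∧ (pairsOf s)[k] = p := by
  unfold posnsOf
  simp only [List.mem_map, List.mem_filter, PySem.List.mem_enumerate_iff]
  constructor
  · rintro ⟨q, ⟨⟨k, hk, rfl⟩, hfil⟩, rfl⟩
    exact ⟨k, hk, by simp, by simpa using hfil⟩
  · rintro ⟨k, hk, rfl, hp⟩
    exact ⟨((0 : Int) + (k : Int), (pairsOf s)[k]), ⟨⟨k, hk, rfl⟩, by simp [hp]⟩, by simp⟩

-- the dict A builds: lookups and keys
theorem dict_getD (s : String) (p : String) :
    (((PySem.List.enumerate (pairsOf s)).foldl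
      (fun d q => d.modify q.2 [] (fun lst => lst ++ [q.1])) PySem.Dict.empty).getD p []) = posnsOf s p := by
  have hswap : (PySem.List.enumerate (pairsOf s)).foldl
      (fun d q => d.modify q.2 [] (fun lst => lst ++ [q.1])) PySem.Dict.empty
      = ((PySem.List.enumerate (pairsOf s)).map Prod.swap).foldl
        (fun d q => d.modify q.1 [] (fun lst => lst ++ [q.2])) PySem.Dict.empty := by
    rw [List.foldl_map]
    rfl
  rw [hswap, PySem.Dict.getD_foldl_modify_append, List.filter_map, List.map_map]
  have hf : ((fun q : String × Int => q.1 == p) ∘ Prod.swap) =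
      (fun q : Int × String => q.2 == p) := rfl
  have hg : ((fun q : String × Int => q.2) ∘ Prod.swap) =
      (fun q : Int × String => q.1) := rfl
  rw [hf, hg]
  unfold posnsOf
  simp [PySem.Dict.getD_empty]

theorem dict_keys (s : String) :
    (((PySem.List.enumerate (pairsOf s)).foldl
      (fun d q => d.modify q.2 [] (fun lst => lst ++ [q.1])) PySem.Dict.empty).keys) =
      PySem.Set.ofList (pairsOf s) := by
  refine (PySem.Dict.keys_foldl_modify_key (PySem.List.enumerate (pairsOf s))
    (fun q : Int × String => q.2) [] (fun _ (q : Int × String) (lst : List Int) => lst ++ [q.1])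
    PySem.Dict.empty).trans ?_
  rw [PySem.Dict.keys_empty, PySem.List.map_snd_enumerate, PySem.Set.ofList_eq_foldl]
  rfl

theorem dict_items (s : String) :
    (((PySem.List.enumerate (pairsOf s)).foldl
      (fun d q => d.modify q.2 [] (fun lst => lst ++ [q.1])) PySem.Dict.empty).items) =
      (PySem.Set.ofList (pairsOf s)).map (fun p => (p, posnsOf s p)) := by
  have hnd : (((PySem.List.enumerate (pairsOf s)).foldl
      (fun d q => d.modify q.2 [] (fun lst => lst ++ [q.1])) PySem.Dict.empty).keys).Nodup := by
    exact PySem.Dict.nodup_keys_foldl_modify_key (PySem.List.enumerate (pairsOf s))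
      (fun q : Int × String => q.2) [] (fun _ (q : Int × String) (lst : List Int) => lst ++ [q.1])
      PySem.Dict.empty PySem.Dict.nodup_keys_empty
  rw [PySem.Dict.items_eq_map_keys _ hnd [], dict_keys]
  exact List.map_congr_left (fun p _ => by rw [dict_getD])

-- the break-loop is an existential over the items
theorem goodPairLoop_iff (items : List (String × List Int)) :
    goodPairLoop items = true ↔ ∃ q ∈ items, ∃ M m : Int,
      PySem.List.max? q.2 (fun x => x) = some M ∧
      PySem.List.min? q.2 (fun x => x) = some m ∧ M - m > 1 := by
  induction items with
  | nil => simp [goodPairLoop]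
  | cons q rest ih =>
    obtain ⟨p, poses⟩ := q
    rcases hmax : PySem.List.max? poses (fun x => x) with _ | M <;>
      rcases hmin : PySem.List.min? poses (fun x => x) with _ | m
    · simp [goodPairLoop, hmax, hmin, ih]
    · rw [PySem.List.max?_eq_none_iff] at hmax; subst hmax
      rw [(PySem.List.min?_eq_none_iff [] (fun x : Int => x)).mpr rfl] at hmin
      simp at hmin
    · rw [PySem.List.min?_eq_none_iff] at hmin; subst hmin
      rw [(PySem.List.max?_eq_none_iff [] (fun x : Int => x)).mpr rfl] at hmax
      simp at hmax
    · by_cases hgt : M - m > 1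
      · simp [goodPairLoop, hmax, hmin, hgt]
      · simp [goodPairLoop, hmax, hmin, hgt, ih]

-- A's good_pair flag ↔ GP
theorem A_good_iff (s : String) :
    goodPairLoop (((PySem.List.enumerate (pairsOf s)).foldl
      (fun d q => d.modify q.2 [] (fun lst => lst ++ [q.1])) PySem.Dict.empty).items) = true ↔
      GP s.toList := by
  rw [dict_items, goodPairLoop_iff]
  constructor
  · rintro ⟨q, hqmem, M, m, hM, hm, hMm⟩
    rw [List.mem_map] at hqmem
    obtain ⟨p, _, rfl⟩ := hqmem
    have hMpos := PySem.List.max?_mem hM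
    have hmpos := PySem.List.min?_mem hm
    rw [mem_posnsOf] at hMpos hmpos
    obtain ⟨kb, hkb, rfl, hpb⟩ := hMpos
    obtain ⟨ka, hka, rfl, hpa⟩ := hmpos
    have hlen := length_pairsOf s
    refine ⟨ka, kb, by omega, by omega, ?_⟩
    exact (pairsOf_eq_iff s ka kb hka hkb).mp (hpa.trans hpb.symm)
  · rintro ⟨a, b, hab, hb1, heq⟩
    have hlen := length_pairsOf s
    have hb : b < (pairsOf s).length := by omega
    have ha : a < (pairsOf s).length := by omega
    have hpe : (pairsOf s)[a] = (pairsOf s)[b] := (pairsOf_eq_iff s a b ha hb).mpr heq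
    have hamem : ((a : Nat) : Int) ∈ posnsOf s ((pairsOf s)[a]) :=
      (mem_posnsOf s _ _).mpr ⟨a, ha, rfl, rfl⟩
    have hbmem : ((b : Nat) : Int) ∈ posnsOf s ((pairsOf s)[a]) :=
      (mem_posnsOf s _ _).mpr ⟨b, hb, rfl, hpe.symm⟩
    rcases hM : PySem.List.max? (posnsOf s ((pairsOf s)[a])) (fun x => x) with _ | M
    · rw [PySem.List.max?_eq_none_iff] at hM; rw [hM] at hamem; simp at hamem
    rcases hm : PySem.List.min? (posnsOf s ((pairsOf s)[a])) (fun x => x) with _ | m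
    · rw [PySem.List.min?_eq_none_iff] at hm; rw [hm] at hamem; simp at hamem
    have h1 : ((b : Nat) : Int) ≤ M := PySem.List.max?_isMax hM _ hbmem
    have h2 : m ≤ ((a : Nat) : Int) := PySem.List.min?_isMin hm _ hamem
    refine ⟨((pairsOf s)[a], posnsOf s ((pairsOf s)[a])),
      List.mem_map.mpr ⟨(pairsOf s)[a],
        (PySem.Set.mem_ofList _ _).mpr (List.getElem_mem ha), rfl⟩,
      M, m, hM, hm, by omega⟩

-- B's pair_ok ↔ GP
theorem B_pair_iff (s : String) :
    ((PySem.List.pyRange 0 ((PySem.Str.len s) - 1) 1).any (fun i =>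
      PySem.Str.isIn (PySem.Str.slice s (some i) (some (i + 2)))
        (PySem.Str.slice s (some (i + 2)) none)) = true) ↔ GP s.toList := by
  rw [List.any_eq_true, PySem.Str.len_eq]
  constructor
  · rintro ⟨i, hi, hpred⟩
    rw [PySem.List.mem_pyRange_one] at hi
    obtain ⟨hi0, hi1⟩ := hi
    obtain ⟨k, rfl⟩ : ∃ k : Nat, i = (k : Int) := ⟨i.toNat, by omega⟩
    have hk1 : k + 1 < s.toList.length := by omega
    rw [PySem.Str.isIn_eq, ← PySem.Chars.exists_prefix_drop_iff_isIn] at hpred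
    obtain ⟨j, hpre⟩ := hpred
    rw [List.prefix_iff_eq_take] at hpre
    rw [slice_pair_toList, slice_suffix_toList, List.drop_drop] at hpre
    rw [take_two_len s.toList k hk1] at hpre
    refine ⟨k, k + 2 + j, by omega, ?_, hpre⟩
    have hlen := congrArg List.length hpre
    simp at hlen
    have hsl : s.toList.length = s.length := by simp
    omega
  · rintro ⟨a, b, hab, hb1, heq⟩
    refine ⟨(a : Int), PySem.List.mem_pyRange_one.mpr ⟨by positivity, by omega⟩, ?_⟩
    rw [PySem.Str.isIn_eq, ← PySem.Chars.exists_prefix_drop_iff_isIn]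
    refine ⟨b - (a + 2), ?_⟩
    rw [slice_pair_toList, slice_suffix_toList, List.drop_drop,
      show a + 2 + (b - (a + 2)) = b by omega, heq]
    exact List.take_prefix _ _

-- the sandwich rule: the two renderings agree pointwise
theorem set_len_pair (x y : Option Char) :
    (PySem.Set.len (PySem.Set.ofList [x, y]) == 1) = (x == y) := by
  by_cases h : y = x
  · subst h
    simp [PySem.Set.ofList, PySem.Set.add, PySem.Set.contains, PySem.Set.empty, PySem.Set.len]
  · have hl : PySem.Set.ofList [x, y] = [x, y] := by
      simp [PySem.Set.ofList, PySem.Set.add, PySem.Set.contains, PySem.Set.empty, h]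
    have hne : (x == y) = false := beq_eq_false_iff_ne.mpr (fun hxy => h hxy.symm)
    rw [hl, hne]
    rfl

theorem mid_sum_iff (s : String) :
    (((PySem.List.pyRange 0 ((PySem.Str.len s) - 2) 1).map (fun i =>
      if PySem.Set.len (PySem.Set.ofList [PySem.Str.pyGet? s i, PySem.Str.pyGet? s (i + 2)]) == 1
      then (1 : Int) else 0)).sum < 1) ↔
    ((PySem.List.pyRange 0 ((PySem.Str.len s) - 2) 1).any (fun i =>
      PySem.Str.pyGet? s i == PySem.Str.pyGet? s (i + 2)) = false) := by
  rw [show (fun i => if (PySem.Set.len (PySem.Set.ofList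
        [PySem.Str.pyGet? s i, PySem.Str.pyGet? s (i + 2)]) == 1) = true then (1 : Int) else 0)
      = (fun i => if (PySem.Str.pyGet? s i == PySem.Str.pyGet? s (i + 2)) = true
        then (1 : Int) else 0) from funext fun i => by rw [set_len_pair]]
  rw [PySem.List.sum_map_ite_one_zero, List.any_eq_false, ← List.countP_eq_zero]
  omega

-- ===== VERDICT (by name: the statement is the Claim_ definition above) =====
theorem is_nice_2_spec : Claim_equal_is_nice_2 := by
  intro s _
  unfold Spec_is_nice_2
  have eA : is_nice_2 s = (if !(goodPairLoop (((PySem.List.enumerate (pairsOf s)).foldl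
      (fun d q => d.modify q.2 [] (fun lst => lst ++ [q.1])) PySem.Dict.empty).items)) then false
    else if (((PySem.List.pyRange 0 ((PySem.Str.len s) - 2) 1).map (fun i =>
        if PySem.Set.len (PySem.Set.ofList [PySem.Str.pyGet? s i, PySem.Str.pyGet? s (i + 2)]) == 1
        then (1 : Int) else 0)).sum < 1) then false else true) := rfl
  have eB : is_nice_2_alt s = (((PySem.List.pyRange 0 ((PySem.Str.len s) - 1) 1).any (fun i =>
      PySem.Str.isIn (PySem.Str.slice s (some i) (some (i + 2)))
        (PySem.Str.slice s (some (i + 2)) none))) &&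
      ((PySem.List.pyRange 0 ((PySem.Str.len s) - 2) 1).any (fun i =>
        PySem.Str.pyGet? s i == PySem.Str.pyGet? s (i + 2)))) := rfl
  rw [eA, eB]
  by_cases hGP : GP s.toList
  · rw [(A_good_iff s).mpr hGP, (B_pair_iff s).mpr hGP]
    by_cases hs : (((PySem.List.pyRange 0 ((PySem.Str.len s) - 2) 1).map (fun i =>
        if PySem.Set.len (PySem.Set.ofList
          [PySem.Str.pyGet? s i, PySem.Str.pyGet? s (i + 2)]) == 1
        then (1 : Int) else 0)).sum < 1)
    · rw [(mid_sum_iff s).mp hs, if_neg (by simp), if_pos hs]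
      simp
    · have hmt : ((PySem.List.pyRange 0 ((PySem.Str.len s) - 2) 1).any (fun i =>
          PySem.Str.pyGet? s i == PySem.Str.pyGet? s (i + 2))) = true := by
        rcases Bool.eq_false_or_eq_true ((PySem.List.pyRange 0 ((PySem.Str.len s) - 2) 1).any
          (fun i => PySem.Str.pyGet? s i == PySem.Str.pyGet? s (i + 2))) with h | h
        · exact h
        · exact absurd ((mid_sum_iff s).mpr h) hs
      rw [hmt, if_neg (by simp), if_neg hs]
      simp
  · have hA : goodPairLoop (((PySem.List.enumerate (pairsOf s)).foldl
        (fun d q => d.modify q.2 [] (fun lst => lst ++ [q.1])) PySem.Dict.empty).items) = false := by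
      rcases Bool.eq_false_or_eq_true (goodPairLoop (((PySem.List.enumerate (pairsOf s)).foldl
        (fun d q => d.modify q.2 [] (fun lst => lst ++ [q.1])) PySem.Dict.empty).items)) with h | h
      · exact absurd ((A_good_iff s).mp h) hGP
      · exact h
    have hB : ((PySem.List.pyRange 0 ((PySem.Str.len s) - 1) 1).any (fun i =>
        PySem.Str.isIn (PySem.Str.slice s (some i) (some (i + 2)))
          (PySem.Str.slice s (some (i + 2)) none))) = false := by
      rcases Bool.eq_false_or_eq_true ((PySem.List.pyRange 0 ((PySem.Str.len s) - 1) 1).any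
        (fun i => PySem.Str.isIn (PySem.Str.slice s (some i) (some (i + 2)))
          (PySem.Str.slice s (some (i + 2)) none))) with h | h
      · exact absurd ((B_pair_iff s).mp h) hGP
      · exact h
    rw [hA, hB]
    simp
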